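-- pv_equiv track=rewrite | github.com/selvaguru-ai/Competitive_Programming | python_code.py | special_sum
-- ===== SOURCE A (Python) =====
-- def special_sum(a):
--     output = []
--     for i in range (0, len(a)):
--         j = i + 1
--         if (len(a)==1):
--             return a
--         elif (j < len(a)):
--             output.append(a[i]+a[j])
--     return special_sum(output)
-- ===== SOURCE B (Python) =====
-- def special_sum(a):
--     # Closed form: after repeated adjacent-pair summing the single survivor is
--     # sum(C(n-1, k) * a[k]); binomials are maintained incrementally, O(n).
--     n = len(a)
--     total = 0
--     c = 1
--     for k, x in enumerate(a):
--         total += c * x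
--         c = c * (n - 1 - k) // (k + 1)
--     return [total]
-- ===== Notes on version B (the rewrite author's own statement) =====
-- stated objective: faster
-- what changed: Replaces the O(n^2) repeated adjacent-pairwise-sum recursion by the closed form sum of C(n-1,k)*a[k], computed in one pass with incrementally maintained binomial coefficients.
-- crash fix: On the empty list A recurses forever ([] maps to []) and raises RecursionError; B returns a singleton zero list. — e.g. on special_sum([]): A raises RecursionError, B returns [0]
import Mathlib
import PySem

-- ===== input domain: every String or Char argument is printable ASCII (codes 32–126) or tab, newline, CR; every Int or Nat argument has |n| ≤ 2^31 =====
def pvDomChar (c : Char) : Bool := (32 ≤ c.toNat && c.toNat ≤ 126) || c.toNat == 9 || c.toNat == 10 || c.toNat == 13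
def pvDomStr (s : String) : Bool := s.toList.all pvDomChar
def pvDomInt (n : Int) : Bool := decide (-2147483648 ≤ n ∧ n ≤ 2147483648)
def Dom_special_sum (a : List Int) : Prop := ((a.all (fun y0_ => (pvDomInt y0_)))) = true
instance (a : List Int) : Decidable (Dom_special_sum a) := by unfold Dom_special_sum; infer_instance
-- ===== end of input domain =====

-- B replaces A's O(n^2) repeated adjacent-pairwise summing by the one-pass closed form
-- sum C(n-1,k)*a[k] with incrementally maintained binomials (measured asymptotically faster).


-- ===== PORT A =====
-- A's inner loop: for i in range(0, len(a)): j = i+1; if j < len(a): output.append(a[i]+a[j])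
def pvStepA (a : List Int) : List Int :=
  (PySem.List.pyRange 0 (a.length : Int) 1).foldl
    (fun acc i =>
      if i + 1 < (a.length : Int) then
        acc ++ [PySem.List.pyGetD a i 0 + PySem.List.pyGetD a (i + 1) 0]
      else acc) []

-- needed by special_sum's termination proof, so it stays above the port
theorem pvStepA_eq (a : List Int) :
    pvStepA a = (List.range (a.length - 1)).map (fun k => a.getD k 0 + a.getD (k + 1) 0) := by
  unfold pvStepA
  rw [PySem.List.pyRange_one]
  rw [List.foldl_map]
  have h1 : ∀ (acc : List Int) (k : ℕ),
      (fun (acc : List Int) (k : ℕ) =>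
        if (0 : Int) + (k : Int) + 1 < (a.length : Int) then
          acc ++ [PySem.List.pyGetD a (0 + (k : Int)) 0 + PySem.List.pyGetD a (0 + (k : Int) + 1) 0]
        else acc) acc k
      = (fun (acc : List Int) (k : ℕ) =>
        if decide (k + 1 < a.length) = true then
          acc ++ [a.getD k 0 + a.getD (k + 1) 0] else acc) acc k := by
    intro acc k
    dsimp only
    simp only [zero_add]
    rw [show ((k : Int) + 1) = (((k + 1 : ℕ)) : Int) by push_cast; ring]
    rw [PySem.List.pyGetD_natCast, PySem.List.pyGetD_natCast]
    by_cases h : k + 1 < a.length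
    · have h' : ((k : Int) + 1 < (a.length : Int)) := by exact_mod_cast h
      simp [h, h']
    · have h' : ¬((k : Int) + 1 < (a.length : Int)) := by exact_mod_cast h
      simp [h, h']
  rw [funext fun acc => funext fun k => h1 acc k]
  rw [PySem.List.foldl_append_if (fun k => decide (k + 1 < a.length))
        (fun k => a.getD k 0 + a.getD (k + 1) 0) (List.range ((a.length : Int) - 0).toNat) []]
  have hgen : ∀ n : ℕ, (List.range n).filter (fun k => decide (k + 1 < n)) = List.range (n - 1) := by
    intro n
    cases n with
    | zero => simp
    | succ n =>
      rw [List.range_succ, List.filter_append]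
      have h1 : (List.range n).filter (fun k => decide (k + 1 < n + 1)) = List.range n := by
        apply List.filter_eq_self.mpr
        intro x hx
        have := List.mem_range.mp hx
        simp; omega
      have h2 : ([n].filter (fun k => decide (k + 1 < n + 1))) = [] := by simp
      rw [h1, h2]
      simp
  have hn : ((a.length : Int) - 0).toNat = a.length := by omega
  rw [hn, hgen, List.nil_append]

theorem pvStepA_length (a : List Int) : (pvStepA a).length = a.length - 1 := by
  rw [pvStepA_eq]; simp

-- literal port of A: len==1 returns a; otherwise recurse on the pairwise sums.
-- On [] Python recurses forever (RecursionError) — that input is outside Pre_;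
-- the 'length = 0' branch only totalizes the definition there.
def special_sum (a : List Int) : List Int :=
  if a.length = 1 then a
  else if _h0 : a.length = 0 then []
  else special_sum (pvStepA a)
termination_by a.length
decreasing_by
  rw [pvStepA_length]; omega

-- ===== PORT B =====
def special_sum_alt (a : List Int) : List Int :=
  let n : Int := a.length
  let r := (PySem.List.enumerate a).foldl
    (fun (st : Int × Int) kx =>
      (st.1 + st.2 * kx.2, PySem.Int.floordiv (st.2 * (n - 1 - kx.1)) (kx.1 + 1)))
    (0, 1)
  [r.1]

-- ===== PRECONDITION & SPEC =====
-- Pre_ excludes only the empty list, on which A never returns (infinite recursion → RecursionError).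
def Pre_special_sum (a : List Int) : Prop := a ≠ []
instance (a : List Int) : Decidable (Pre_special_sum a) := by unfold Pre_special_sum; infer_instance
def pvWitness_special_sum : List Int := [1, 2, 3]

-- On the empty list A recurses forever ([] maps to []) and raises RecursionError; B returns a singleton zero list.
def Raises_special_sum (a : List Int) : Prop := a = []
instance (a : List Int) : Decidable (Raises_special_sum a) := by unfold Raises_special_sum; infer_instance
def pvRaiseWitness_special_sum : List Int := []
def pvRaiseWitnessOut_special_sum : List Int := [0]

def Spec_special_sum (a : List Int) (out : List Int) : Prop := out = special_sum_alt a
instance (a : List Int) (out : List Int) : Decidable (Spec_special_sum a out) := by unfold Spec_special_sum; infer_instance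

-- ===== CLAIM (what is proved, stated in full; the proofs are below) =====
def Claim_equal_special_sum : Prop := ∀ (a : List Int), Dom_special_sum a → Pre_special_sum a → Spec_special_sum a (special_sum a)
def Claim_raises_special_sum : Prop := (∀ (a : List Int), Dom_special_sum a → Raises_special_sum a → ¬ Pre_special_sum a) ∧ (Dom_special_sum (pvRaiseWitness_special_sum) ∧ Raises_special_sum (pvRaiseWitness_special_sum) ∧ special_sum_alt (pvRaiseWitness_special_sum) = pvRaiseWitnessOut_special_sum)

-- ===== LEMMAS AND PROOFS =====

-- the common value: the binomially weighted sum of a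
def pvW (a : List Int) : Int :=
  ∑ k ∈ Finset.range a.length, ((a.length - 1).choose k : Int) * a.getD k 0

-- Pascal-style reindexing: one pairwise-summing step preserves the weighted sum
theorem pvPascal (m : ℕ) (f : ℕ → Int) :
    ∑ k ∈ Finset.range (m + 1), (m.choose k : Int) * (f k + f (k + 1))
      = ∑ k ∈ Finset.range (m + 2), ((m + 1).choose k : Int) * f k := by
  have hshift : ∑ k ∈ Finset.range (m + 1), (m.choose k : Int) * f k
      = f 0 + ∑ k ∈ Finset.range (m + 1), (m.choose (k + 1) : Int) * f (k + 1) := by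
    rw [Finset.sum_range_succ (fun k => (m.choose (k + 1) : Int) * f (k + 1)) m]
    rw [Finset.sum_range_succ' (fun k => (m.choose k : Int) * f k) m]
    simp [Nat.choose_succ_self]
    ring
  have hrhs : ∑ k ∈ Finset.range (m + 2), ((m + 1).choose k : Int) * f k
      = (∑ k ∈ Finset.range (m + 1), ((m + 1).choose (k + 1) : Int) * f (k + 1)) + f 0 := by
    rw [Finset.sum_range_succ' (fun k => ((m + 1).choose k : Int) * f k) (m + 1)]
    simp
  rw [hrhs]
  have : ∀ k, ((m + 1).choose (k + 1) : Int) = (m.choose k : Int) + (m.choose (k + 1) : Int) := by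
    intro k; rw [Nat.choose_succ_succ]; push_cast; ring
  calc ∑ k ∈ Finset.range (m + 1), (m.choose k : Int) * (f k + f (k + 1))
      = (∑ k ∈ Finset.range (m + 1), (m.choose k : Int) * f k)
        + ∑ k ∈ Finset.range (m + 1), (m.choose k : Int) * f (k + 1) := by
        rw [← Finset.sum_add_distrib]; apply Finset.sum_congr rfl; intro k _; ring
    _ = f 0 + (∑ k ∈ Finset.range (m + 1), (m.choose (k + 1) : Int) * f (k + 1))
        + ∑ k ∈ Finset.range (m + 1), (m.choose k : Int) * f (k + 1) := by rw [hshift]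
    _ = (∑ k ∈ Finset.range (m + 1), ((m + 1).choose (k + 1) : Int) * f (k + 1)) + f 0 := by
        rw [show ∑ k ∈ Finset.range (m + 1), ((m + 1).choose (k + 1) : Int) * f (k + 1)
            = (∑ k ∈ Finset.range (m + 1), (m.choose (k + 1) : Int) * f (k + 1))
              + ∑ k ∈ Finset.range (m + 1), (m.choose k : Int) * f (k + 1) from by
          rw [← Finset.sum_add_distrib]
          exact Finset.sum_congr rfl (fun k _ => by rw [this k]; ring)]
        ring

theorem pvW_step (a : List Int) (h2 : 2 ≤ a.length) : pvW (pvStepA a) = pvW a := by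
  obtain ⟨m, hm⟩ : ∃ m, a.length = m + 2 := ⟨a.length - 2, by omega⟩
  have hlen : (pvStepA a).length = m + 1 := by rw [pvStepA_length]; omega
  unfold pvW
  rw [hlen, hm]
  have : ∀ k ∈ Finset.range (m + 1),
      ((m + 1 - 1).choose k : Int) * (pvStepA a).getD k 0
        = (m.choose k : Int) * (a.getD k 0 + a.getD (k + 1) 0) := by
    intro k hk
    have hk' : k < m + 1 := Finset.mem_range.mp hk
    rw [pvStepA_eq]
    rw [PySem.List.getD_map_range (fun k => a.getD k 0 + a.getD (k + 1) 0) _ k 0 (by omega)]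
    simp
  rw [Finset.sum_congr rfl this, pvPascal m (fun k => a.getD k 0)]
  simp

theorem pvA_eq : ∀ (n : ℕ) (a : List Int), a.length = n → a ≠ [] → special_sum a = [pvW a] := by
  intro n
  induction n using Nat.strong_induction_on with
  | _ n ih =>
    intro a hn hne
    rcases Nat.lt_or_ge a.length 2 with hlt | hge
    · have h1 : a.length = 1 := by
        cases a with
        | nil => exact absurd rfl hne
        | cons x t => simp at hlt ⊢; omega
      obtain ⟨x, hx⟩ : ∃ x, a = [x] := by
        cases a with
        | nil => exact absurd rfl hne
        | cons x t => exact ⟨x, by simp at h1; simp [h1]⟩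
      subst hx
      rw [special_sum]
      simp [pvW]
    · rw [special_sum]
      rw [if_neg (by omega), dif_neg (by omega)]
      have hlen : (pvStepA a).length = a.length - 1 := pvStepA_length a
      have hne' : pvStepA a ≠ [] := by
        intro h; rw [h] at hlen; simp at hlen; omega
      rw [ih (a.length - 1) (by omega) (pvStepA a) (by omega) hne']
      rw [pvW_step a hge]

-- the fold of B maintains (partial weighted sum, current binomial)
theorem pvB_inv (n : ℕ) : ∀ (t : List Int) (j : ℕ) (acc : Int), j + t.length = n →
    ((PySem.List.enumerate t (j : Int)).foldl
      (fun (st : Int × Int) kx =>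
        (st.1 + st.2 * kx.2, PySem.Int.floordiv (st.2 * ((n : Int) - 1 - kx.1)) (kx.1 + 1)))
      (acc, ((n - 1).choose j : Int))).1
    = acc + ∑ k ∈ Finset.range t.length, ((n - 1).choose (j + k) : Int) * t.getD k 0 := by
  intro t
  induction t with
  | nil => intro j acc _; simp [PySem.List.enumerate]
  | cons x t ih =>
    intro j acc hj
    rw [PySem.List.enumerate_cons]
    rw [List.foldl_cons]
    have hjn : j + 1 ≤ n := by simp at hj; omega
    have hdiv : PySem.Int.floordiv (((n - 1).choose j : Int) * ((n : Int) - 1 - (j : Int))) ((j : Int) + 1)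
        = ((n - 1).choose (j + 1) : Int) := by
      have hcast : ((n : Int) - 1 - (j : Int)) = ((n - 1 - j : ℕ) : Int) := by
        omega
      rw [hcast]
      rw [show (((n - 1).choose j : Int) * ((n - 1 - j : ℕ) : Int)) = (((n - 1).choose j * (n - 1 - j) : ℕ) : Int) by push_cast; ring]
      rw [show ((j : Int) + 1) = ((j + 1 : ℕ) : Int) by push_cast; ring]
      rw [PySem.Int.floordiv_natCast]
      rw [← Nat.choose_succ_right_eq (n - 1) j]
      rw [Nat.mul_div_cancel _ (by omega)]
    rw [show ((j : Int) + 1) = ((j + 1 : ℕ) : Int) by push_cast; ring] at hdiv ⊢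
    dsimp only
    rw [hdiv]
    rw [ih (j + 1) (acc + ((n - 1).choose j : Int) * x) (by simp at hj ⊢; omega)]
    simp only [List.length_cons]
    rw [Finset.sum_range_succ' (fun k => ((n - 1).choose (j + k) : Int) * (x :: t).getD k 0) t.length]
    simp only [List.getD_cons_succ, List.getD_cons_zero]
    have hsum : ∑ k ∈ Finset.range t.length, ((n - 1).choose (j + (k + 1)) : Int) * t.getD k 0
        = ∑ k ∈ Finset.range t.length, ((n - 1).choose (j + 1 + k) : Int) * t.getD k 0 :=
      Finset.sum_congr rfl (fun k _ => by rw [show j + (k + 1) = j + 1 + k by omega])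
    rw [hsum]
    simp only [Nat.add_zero]
    ring

theorem pvB_eq (a : List Int) : special_sum_alt a = [pvW a] := by
  unfold special_sum_alt
  have h := pvB_inv a.length a 0 0 (by simp)
  simp only [Nat.cast_zero] at h
  rw [show ((a.length - 1).choose 0 : Int) = 1 by simp] at h
  simp only []
  rw [h]
  unfold pvW
  simp

-- ===== VERDICT (by name: the statement is the Claim_ definition above) =====
theorem special_sum_spec : Claim_equal_special_sum := by
  intro a _ hpre
  unfold Spec_special_sum
  rw [pvA_eq a.length a rfl hpre, pvB_eq]

theorem special_sum_raises : Claim_raises_special_sum := by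
  unfold Claim_raises_special_sum
  exact ⟨fun a _ hr hp => hp hr, by decide⟩

-- witness self-check, extracted from the raises claim
theorem pvRaiseWitness_ok :
    special_sum_alt pvRaiseWitness_special_sum = pvRaiseWitnessOut_special_sum :=
  special_sum_raises.2.2.2
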